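-- pv_equiv track=rewrite | github.com/FrenchCommando/codingsamples | most_frequent_digit_sum.py | solve
-- ===== SOURCE A (Python) =====
-- def sum_digits(i: int):
--     return sum(map(int, iter(str(i))))
--
-- def solve(a: int, b: int):
--     if a == b:
--         return {sum_digits(i=a)}
--     if b < a:
--         return solve(a=b, b=a)
--     sa, sb = str(a), str(b)
--     if len(sa) == len(sb) and sa[0] == sb[0]:
--         short_a, short_b = int(sa[1:]), int(sb[1:])
--         s = solve(a=short_a, b=short_b)
--         i = int(sa[0])
--         return {i + ss for ss in s}
--     return {len(str(a)), len(str(b))}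
-- ===== SOURCE B (Python) =====
-- def solve(a, b):
--     total = 0
--     while True:
--         if b < a:
--             a, b = b, a
--         elif a == b:
--             return {total + sum(int(c) for c in str(a))}
--         else:
--             sa, sb = str(a), str(b)
--             if len(sa) != len(sb) or sa[:1] != sb[:1]:
--                 return {total + len(sa), total + len(sb)}
--             total += int(sa[:1])
--             a, b = int(sa[1:]), int(sb[1:])
-- ===== Notes on version B (the rewrite author's own statement) =====
-- stated objective: simpler
-- what changed: Replaces the non-tail recursion (which swaps via a recursive call and rebuilds the returned set at every level by mapping the stripped leading digit back onto each element) by a single while-loop over the state (total, a, b) that carries the running sum of stripped leading digits and builds the final set once, at one of the two exits.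
import Mathlib
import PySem

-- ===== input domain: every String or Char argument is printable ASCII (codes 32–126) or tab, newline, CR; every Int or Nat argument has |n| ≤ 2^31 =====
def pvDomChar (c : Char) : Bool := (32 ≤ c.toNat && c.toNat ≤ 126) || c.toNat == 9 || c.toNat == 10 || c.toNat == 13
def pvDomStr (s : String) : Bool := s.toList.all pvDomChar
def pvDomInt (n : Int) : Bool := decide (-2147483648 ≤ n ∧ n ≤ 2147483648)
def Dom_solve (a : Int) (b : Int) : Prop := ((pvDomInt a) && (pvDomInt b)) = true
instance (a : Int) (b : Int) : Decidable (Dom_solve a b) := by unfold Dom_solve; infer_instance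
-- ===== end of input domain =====

-- B replaces A's non-tail recursion (which rebuilds the returned set at every level, post-mapping
-- the stripped leading digit onto each element) by a single while-loop over the state
-- (total, a, b) that adds the running total once at each of the two exits; return value only.

-- ===== PORT A =====
-- helper: sum(map(int, iter(str(i)))) from Source A.
-- int(c) for the char '-' raises ValueError in Python; that input is outside Pre_solve, here getD 0.
def sumDigits (i : Int) : Int :=
  (((PySem.Int.toChars i).map (fun c => (PySem.Int.ofChars? [c]).getD 0))).sum

-- fueled transcription of A's recursion (fuel only makes it total; 1000 is never exhausted on Dom_solve).
-- int(sa[1:]) / int(sa[0]) never raise inside Pre_solve; outside the port uses getD 0.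
def solveA : Nat → Int → Int → List Int
  | 0, _, _ => []
  | Nat.succ n, a, b =>
    if a = b then PySem.Set.ofList [sumDigits a]
    else if b < a then solveA n b a
    else
      let sa := PySem.Int.toChars a
      let sb := PySem.Int.toChars b
      if sa.length = sb.length ∧ PySem.List.pyGet? sa 0 = PySem.List.pyGet? sb 0 then
        let shortA := (PySem.Int.ofChars? (sa.drop 1)).getD 0
        let shortB := (PySem.Int.ofChars? (sb.drop 1)).getD 0
        let s := solveA n shortA shortB
        let i := (PySem.Int.ofChars? (sa.take 1)).getD 0
        PySem.Set.ofList (s.map (fun ss => i + ss))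
      else PySem.Set.ofList [(sa.length : Int), (sb.length : Int)]

def solve (a : Int) (b : Int) : List Int := solveA 1000 a b

-- ===== PORT B =====
-- fueled transcription of Source B's 'while True' loop: each iteration is one step of this tail
-- recursion on the state (total, a, b); strings handled with the PySem.Str string API.
def solveLoop : Nat → Int → Int → Int → List Int
  | 0, _, _, _ => []
  | Nat.succ n, total, a, b =>
    if b < a then solveLoop n total b a
    else if a = b then
      PySem.Set.ofList
        [total + (PySem.Int.toStr a).toList.foldl (fun s c => s + (PySem.Int.ofChars? [c]).getD 0) 0]
    else
      let sa := PySem.Int.toStr a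
      let sb := PySem.Int.toStr b
      if PySem.Str.len sa ≠ PySem.Str.len sb ∨
          PySem.Str.slice sa none (some 1) ≠ PySem.Str.slice sb none (some 1) then
        PySem.Set.ofList [total + PySem.Str.len sa, total + PySem.Str.len sb]
      else
        solveLoop n (total + (PySem.Int.ofStr? (PySem.Str.slice sa none (some 1))).getD 0)
          ((PySem.Int.ofStr? (PySem.Str.slice sa (some 1) none)).getD 0)
          ((PySem.Int.ofStr? (PySem.Str.slice sb (some 1) none)).getD 0)

def solve_alt (a : Int) (b : Int) : List Int := solveLoop 1000 0 a b

-- ===== PRECONDITION & SPEC =====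
-- A raises ValueError (int('-')) exactly when both arguments are negative with equal str-lengths
-- (this includes a = b < 0, where sum_digits(a) hits int('-') too); Pre_ excludes exactly those.
def Pre_solve (a : Int) (b : Int) : Prop :=
  a < 0 → b < 0 → (PySem.Int.toChars a).length ≠ (PySem.Int.toChars b).length
instance (a : Int) (b : Int) : Decidable (Pre_solve a b) := by unfold Pre_solve; infer_instance
def pvWitness_solve : Int × Int := (17, 5)

def Spec_solve (a : Int) (b : Int) (out : List Int) : Prop := out = solve_alt a b
instance (a : Int) (b : Int) (out : List Int) : Decidable (Spec_solve a b out) := by unfold Spec_solve; infer_instance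

-- ===== CLAIM (what is proved, stated in full; the proofs are below) =====
def Claim_equal_solve : Prop := ∀ (a : Int) (b : Int), Dom_solve a b → Pre_solve a b → Spec_solve a b (solve a b)

-- ===== LEMMAS AND PROOFS =====

lemma solveA_nodup : ∀ (n : Nat) (a b : Int), (solveA n a b).Nodup := by
  intro n
  induction n with
  | zero => intro a b; simp [solveA]
  | succ n ih =>
    intro a b
    simp only [solveA]
    split_ifs with h1 h2 h3
    · exact PySem.Set.nodup_ofList _
    · exact ih b a
    · exact PySem.Set.nodup_ofList _
    · exact PySem.Set.nodup_ofList _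

lemma set_ofList_singleton (x : Int) : PySem.Set.ofList [x] = [x] := rfl

lemma toChars_ne_nil (a : Int) : PySem.Int.toChars a ≠ [] := by
  unfold PySem.Int.toChars
  split_ifs
  · simp
  · intro h
    have := @Nat.length_toDigits_pos 10 a.toNat
    simp [h] at this

-- for nonempty lists, equality of the [:1] slices is equality of the 0th characters
lemma take_one_eq_iff_pyGet (xs ys : List Char) (hx : xs ≠ []) (hy : ys ≠ []) :
    (xs.take 1 = ys.take 1) ↔ (PySem.List.pyGet? xs 0 = PySem.List.pyGet? ys 0) := by
  cases xs with
  | nil => exact absurd rfl hx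
  | cons x xt =>
    cases ys with
    | nil => exact absurd rfl hy
    | cons y yt => simp [PySem.List.pyGet?, PySem.List.pyIdx?]

lemma str_slice_to_one (a : Int) :
    (PySem.Str.slice (PySem.Int.toStr a) none (some 1)).toList = (PySem.Int.toChars a).take 1 := by
  simp [PySem.Str.slice, PySem.Chars.slice_eq_listSlice, PySem.Int.toList_toStr,
    PySem.List.slice_to _ (by norm_num : (0:Int) ≤ 1)]

lemma str_slice_from_one (a : Int) :
    (PySem.Str.slice (PySem.Int.toStr a) (some 1) none).toList = (PySem.Int.toChars a).drop 1 := by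
  simp [PySem.Str.slice, PySem.Chars.slice_eq_listSlice, PySem.Int.toList_toStr,
    PySem.List.slice_from _ (by norm_num : (0:Int) ≤ 1)]

lemma ofStr_slice_to_one (a : Int) :
    PySem.Int.ofStr? (PySem.Str.slice (PySem.Int.toStr a) none (some 1)) =
      PySem.Int.ofChars? ((PySem.Int.toChars a).take 1) := by
  rw [PySem.Int.ofStr?, str_slice_to_one]

lemma ofStr_slice_from_one (a : Int) :
    PySem.Int.ofStr? (PySem.Str.slice (PySem.Int.toStr a) (some 1) none) =
      PySem.Int.ofChars? ((PySem.Int.toChars a).drop 1) := by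
  rw [PySem.Int.ofStr?, str_slice_from_one]

-- B's (negated) loop guard is the negation of A's strip condition
lemma guard_iff (a b : Int) :
    (PySem.Str.len (PySem.Int.toStr a) ≠ PySem.Str.len (PySem.Int.toStr b) ∨
      PySem.Str.slice (PySem.Int.toStr a) none (some 1) ≠
        PySem.Str.slice (PySem.Int.toStr b) none (some 1)) ↔
    ¬ ((PySem.Int.toChars a).length = (PySem.Int.toChars b).length ∧
        PySem.List.pyGet? (PySem.Int.toChars a) 0 = PySem.List.pyGet? (PySem.Int.toChars b) 0) := by
  have hlen : (PySem.Str.len (PySem.Int.toStr a) = PySem.Str.len (PySem.Int.toStr b)) ↔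
      ((PySem.Int.toChars a).length = (PySem.Int.toChars b).length) := by
    simp [PySem.Str.len, PySem.Int.toList_toStr]
  have hsl : (PySem.Str.slice (PySem.Int.toStr a) none (some 1) =
      PySem.Str.slice (PySem.Int.toStr b) none (some 1)) ↔
      (PySem.List.pyGet? (PySem.Int.toChars a) 0 = PySem.List.pyGet? (PySem.Int.toChars b) 0) := by
    rw [← String.toList_inj, str_slice_to_one, str_slice_to_one,
      take_one_eq_iff_pyGet _ _ (toChars_ne_nil a) (toChars_ne_nil b)]
  rw [not_and_or, ← hlen, ← hsl]

-- the loop computes A's recursion shifted by the running total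
lemma solveLoop_eq_map : ∀ (n : Nat) (total a b : Int),
    solveLoop n total a b = (solveA n a b).map (fun x => total + x) := by
  intro n
  induction n with
  | zero => intro total a b; simp [solveA, solveLoop]
  | succ n ih =>
    intro total a b
    simp only [solveA, solveLoop]
    by_cases h1 : a = b
    · have : ¬ b < a := by omega
      simp only [if_pos h1, if_neg this]
      rw [set_ofList_singleton, set_ofList_singleton]
      have hfold : ((PySem.Int.toStr a).toList.foldl
          (fun s c => s + (PySem.Int.ofChars? [c]).getD 0) 0) = sumDigits a := by
        rw [sumDigits, List.sum_eq_foldl, List.foldl_map, PySem.Int.toList_toStr]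
      rw [hfold, h1]
      simp
    · by_cases h2 : b < a
      · simp only [if_neg h1, if_pos h2]
        exact ih total b a
      · simp only [if_neg h1, if_neg h2]
        by_cases h3 : (PySem.Int.toChars a).length = (PySem.Int.toChars b).length ∧
            PySem.List.pyGet? (PySem.Int.toChars a) 0 = PySem.List.pyGet? (PySem.Int.toChars b) 0
        · rw [if_neg (by rw [guard_iff]; exact not_not_intro h3), if_pos h3]
          rw [ofStr_slice_to_one, ofStr_slice_from_one, ofStr_slice_from_one]
          have hs : (List.map
              (fun ss => (PySem.Int.ofChars? ((PySem.Int.toChars a).take 1)).getD 0 + ss)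
              (solveA n ((PySem.Int.ofChars? ((PySem.Int.toChars a).drop 1)).getD 0)
                ((PySem.Int.ofChars? ((PySem.Int.toChars b).drop 1)).getD 0))).Nodup :=
            (solveA_nodup n _ _).map (fun x y h => by omega)
          rw [PySem.Set.ofList_eq_self_of_nodup _ hs, ih, List.map_map]
          simp [add_assoc]
        · rw [if_pos (by rw [guard_iff]; exact h3), if_neg h3]
          have hla : PySem.Str.len (PySem.Int.toStr a) = ((PySem.Int.toChars a).length : Int) := by
            simp [PySem.Str.len, PySem.Int.toList_toStr]
          have hlb : PySem.Str.len (PySem.Int.toStr b) = ((PySem.Int.toChars b).length : Int) := by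
            simp [PySem.Str.len, PySem.Int.toList_toStr]
          rw [hla, hlb]
          by_cases hl : (PySem.Int.toChars b).length = (PySem.Int.toChars a).length
          · simp [PySem.Set.ofList, PySem.Set.add, PySem.Set.contains, hl]
          · simp [PySem.Set.ofList, PySem.Set.add, PySem.Set.contains, hl]

-- ===== VERDICT (by name: the statement is the Claim_ definition above) =====
theorem solve_spec : Claim_equal_solve := by
  intro a b _ _
  unfold Spec_solve solve solve_alt
  rw [solveLoop_eq_map]
  simp
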